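-- pv_equiv track=rewrite | github.com/alasdairnicol/advent-of-code-2020 | day24b.py | locate_tile
-- ===== SOURCE A (Python) =====
-- moves = {
--     "ne": (1, 1),
--     "e": (2, 0),
--     "se": (1, -1),
--     "sw": (-1, -1),
--     "w": (-2, 0),
--     "nw": (-1, 1),
-- }
--
-- def locate_tile(directions):
--     previous = ""
--     x, y = 0, 0
--     for d in directions:
--         if d in "ns":
--             previous = d
--             continue
--
--         d = previous + d
--         previous = ""
--         dx, dy = moves[d]
--         x += dx
--         y += dy
--     return x, y
-- ===== SOURCE B (Python) =====
-- moves = {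
--     "ne": (1, 1),
--     "e": (2, 0),
--     "se": (1, -1),
--     "sw": (-1, -1),
--     "w": (-2, 0),
--     "nw": (-1, 1),
-- }
--
-- def _tokenize(directions):
--     # build the list of direction tokens: pair a 'n'/'s' with a following
--     # 'e'/'w' when possible, otherwise take the character alone
--     tokens = []
--     i = 0
--     n = len(directions)
--     while i < n:
--         c = directions[i]
--         if c in "ns" and i + 1 < n and directions[i + 1] in "ew":
--             tokens.append(directions[i:i + 2])
--             i += 2
--         else:
--             tokens.append(c)
--             i += 1
--     return tokens
--
-- def locate_tile(directions):
--     x, y = 0, 0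
--     for t in _tokenize(directions):
--         if t == "n" or t == "s":
--             continue  # dangling prefix is ignored, like A
--         dx, dy = moves[t]
--         x += dx
--         y += dy
--     return x, y
-- ===== Notes on version B (the rewrite author's own statement) =====
-- stated objective: alternative
-- what changed: B tokenizes the string into direction units first (pairing n/s with a following e/w) and then folds the token list into coordinates, replacing A's single-pass prefix-accumulator state machine.
import Mathlib
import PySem

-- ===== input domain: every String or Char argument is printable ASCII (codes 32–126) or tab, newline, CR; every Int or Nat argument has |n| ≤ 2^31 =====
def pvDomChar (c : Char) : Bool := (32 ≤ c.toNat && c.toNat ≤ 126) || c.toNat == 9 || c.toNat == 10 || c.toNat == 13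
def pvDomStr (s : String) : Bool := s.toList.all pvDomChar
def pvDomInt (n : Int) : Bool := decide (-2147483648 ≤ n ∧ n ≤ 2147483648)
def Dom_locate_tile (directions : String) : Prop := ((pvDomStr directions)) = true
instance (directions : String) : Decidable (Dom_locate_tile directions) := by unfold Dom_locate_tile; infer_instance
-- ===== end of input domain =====

-- B is an alternative decomposition: tokenize-then-fold instead of A's prefix-accumulator state machine; same cost.
-- ===== PORT A =====
def moves : PySem.Dict String (Int × Int) := PySem.Dict.ofList
  [("ne", (1, 1)), ("e", (2, 0)), ("se", (1, -1)), ("sw", (-1, -1)), ("w", (-2, 0)), ("nw", (-1, 1))]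

-- the for-loop of A as structural recursion over the characters with state (previous, x, y);
-- the dict lookup raises KeyError in Python on a missing key: those inputs are outside Pre_ (getD default is never used inside Pre_)
def locA : List Char → String → Int → Int → String × Int × Int
  | [], prev, x, y => (prev, x, y)
  | c :: rest, _prev, x, y =>
    if c = 'n' ∨ c = 's' then locA rest (String.mk [c]) x y
    else
      let d := _prev ++ String.mk [c]
      let m := moves.getD d (0, 0)
      locA rest "" (x + m.1) (y + m.2)

def locate_tile (directions : String) : Int × Int :=
  let r := locA directions.toList "" 0 0
  (r.2.1, r.2.2)

-- ===== PORT B =====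
-- B's tokenizer: pair a 'n'/'s' with a following 'e'/'w', otherwise a single-character token
def tokB : List Char → List String
  | [] => []
  | [c] => [String.mk [c]]
  | c :: c2 :: rest =>
    if (c = 'n' ∨ c = 's') ∧ (c2 = 'e' ∨ c2 = 'w') then String.mk [c, c2] :: tokB rest
    else String.mk [c] :: tokB (c2 :: rest)

def stepB (xy : Int × Int) (t : String) : Int × Int :=
  if t = "n" ∨ t = "s" then xy
  else
    let m := moves.getD t (0, 0)
    (xy.1 + m.1, xy.2 + m.2)

def locate_tile_alt (directions : String) : Int × Int :=
  (tokB directions.toList).foldl stepB (0, 0)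

-- ===== PRECONDITION & SPEC =====
-- Pre_ excludes exactly the strings containing a character other than the four direction letters: on those the Python A raises KeyError.
def Pre_locate_tile (directions : String) : Prop :=
  (directions.toList.all (fun c => c == 'n' || c == 's' || c == 'e' || c == 'w')) = true
instance (directions : String) : Decidable (Pre_locate_tile directions) := by unfold Pre_locate_tile; infer_instance
def pvWitness_locate_tile : String := "nwwswee"

def Spec_locate_tile (directions : String) (out : Int × Int) : Prop := out = locate_tile_alt directions
instance (directions : String) (out : Int × Int) : Decidable (Spec_locate_tile directions out) := by unfold Spec_locate_tile; infer_instance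

-- ===== CLAIM (what is proved, stated in full; the proofs are below) =====
def Claim_equal_locate_tile : Prop := ∀ (directions : String), Dom_locate_tile directions → Pre_locate_tile directions → Spec_locate_tile directions (locate_tile directions)

-- ===== LEMMAS AND PROOFS =====

theorem key (cs : List Char) : ∀ x y : Int,
    (∀ c ∈ cs, c = 'n' ∨ c = 's' ∨ c = 'e' ∨ c = 'w') →
    (locA cs "" x y).2 = (tokB cs).foldl stepB (x, y) := by
  induction cs using tokB.induct with
  | case1 => intro x y _; simp [locA, tokB]
  | case2 c =>
    intro x y h
    have hc := h c (by simp)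
    rcases hc with hc | hc | hc | hc <;> subst hc <;>
      simp [locA, tokB, stepB,
            show String.mk ['n'] = "n" from rfl, show String.mk ['s'] = "s" from rfl,
            show String.mk ['e'] = "e" from rfl, show String.mk ['w'] = "w" from rfl,
            show ("" ++ String.mk ['e']) = "e" from rfl,
            show ("" ++ String.mk ['w']) = "w" from rfl,
            show moves.getD "e" ((0:Int),(0:Int)) = (2,0) from by decide,
            show moves.getD "w" ((0:Int),(0:Int)) = (-2,0) from by decide,
            show moves.getD "e" ((0:Int),(0:Int)) = (2,0) from by decide,
            show moves.getD "w" ((0:Int),(0:Int)) = (-2,0) from by decide]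
  | case3 c c2 rest hcond ih =>
    intro x y h
    have hrest : ∀ c ∈ rest, c = 'n' ∨ c = 's' ∨ c = 'e' ∨ c = 'w' :=
      fun d hm => h d (by simp [hm])
    obtain ⟨h1, h2⟩ := hcond
    rcases h1 with hc | hc <;> rcases h2 with hc2 | hc2 <;> subst hc <;> subst hc2 <;>
      simp [locA, tokB, stepB, ih _ _ hrest,
            show String.mk ['n'] = "n" from rfl, show String.mk ['s'] = "s" from rfl,
            show String.mk ['e'] = "e" from rfl, show String.mk ['w'] = "w" from rfl,

            show (String.mk ['n'] ++ String.mk ['e']) = "ne" from rfl,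
            show (String.mk ['n'] ++ String.mk ['w']) = "nw" from rfl,
            show (String.mk ['s'] ++ String.mk ['e']) = "se" from rfl,
            show (String.mk ['s'] ++ String.mk ['w']) = "sw" from rfl,
            show String.mk ['n','e'] = "ne" from rfl,
            show String.mk ['n','w'] = "nw" from rfl,
            show String.mk ['s','e'] = "se" from rfl,
            show String.mk ['s','w'] = "sw" from rfl,
            show moves.getD "ne" ((0:Int),(0:Int)) = (1,1) from by decide,
            show moves.getD "nw" ((0:Int),(0:Int)) = (-1,1) from by decide,
            show moves.getD "se" ((0:Int),(0:Int)) = (1,-1) from by decide,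
            show moves.getD "sw" ((0:Int),(0:Int)) = (-1,-1) from by decide,
            show moves.getD "ne" ((0:Int),(0:Int)) = (1,1) from by decide,
            show moves.getD "nw" ((0:Int),(0:Int)) = (-1,1) from by decide,
            show moves.getD "se" ((0:Int),(0:Int)) = (1,-1) from by decide,
            show moves.getD "sw" ((0:Int),(0:Int)) = (-1,-1) from by decide]
  | case4 c c2 rest hcond ih =>
    intro x y h
    have hc := h c (by simp)
    have hc2 := h c2 (by simp)
    have hrest2 : ∀ d ∈ c2 :: rest, d = 'n' ∨ d = 's' ∨ d = 'e' ∨ d = 'w' :=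
      fun d hm => h d (by simp at hm; rcases hm with hm | hm <;> simp [hm])
    rcases hc with hc | hc | hc | hc <;> subst hc
    · -- c = 'n': the paired condition failed, so c2 ∈ {n, s}; A overwrites the
      -- dangling prefix, B skips the lone "n" token
      rcases hc2 with hc2 | hc2 | hc2 | hc2 <;> subst hc2
      · have := ih x y hrest2
        simp [locA, tokB, stepB,
            show String.mk ['n'] = "n" from rfl, show String.mk ['s'] = "s" from rfl,
            show String.mk ['e'] = "e" from rfl, show String.mk ['w'] = "w" from rfl,
            ] at this ⊢; simpa using this
      · have := ih x y hrest2
        simp [locA, tokB, stepB,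
            show String.mk ['n'] = "n" from rfl, show String.mk ['s'] = "s" from rfl,
            show String.mk ['e'] = "e" from rfl, show String.mk ['w'] = "w" from rfl,
            ] at this ⊢; simpa using this
      · exact absurd ⟨Or.inl rfl, Or.inl rfl⟩ hcond
      · exact absurd ⟨Or.inl rfl, Or.inr rfl⟩ hcond
    · rcases hc2 with hc2 | hc2 | hc2 | hc2 <;> subst hc2
      · have := ih x y hrest2
        simp [locA, tokB, stepB,
            show String.mk ['n'] = "n" from rfl, show String.mk ['s'] = "s" from rfl,
            show String.mk ['e'] = "e" from rfl, show String.mk ['w'] = "w" from rfl,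
            ] at this ⊢; simpa using this
      · have := ih x y hrest2
        simp [locA, tokB, stepB,
            show String.mk ['n'] = "n" from rfl, show String.mk ['s'] = "s" from rfl,
            show String.mk ['e'] = "e" from rfl, show String.mk ['w'] = "w" from rfl,
            ] at this ⊢; simpa using this
      · exact absurd ⟨Or.inr rfl, Or.inl rfl⟩ hcond
      · exact absurd ⟨Or.inr rfl, Or.inr rfl⟩ hcond
    · -- c = 'e'
      have := ih (x + 2) (y + 0) hrest2
      simp [locA, tokB, stepB,
            show String.mk ['n'] = "n" from rfl, show String.mk ['s'] = "s" from rfl,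
            show String.mk ['e'] = "e" from rfl, show String.mk ['w'] = "w" from rfl,
            show ("" ++ String.mk ['e']) = "e" from rfl,
            show moves.getD "e" ((0:Int),(0:Int)) = (2,0) from by decide,
            show moves.getD "e" ((0:Int),(0:Int)) = (2,0) from by decide] at this ⊢
      tauto
    · -- c = 'w'
      have := ih (x - 2) (y + 0) hrest2
      simp [locA, tokB, stepB,
            show String.mk ['n'] = "n" from rfl, show String.mk ['s'] = "s" from rfl,
            show String.mk ['e'] = "e" from rfl, show String.mk ['w'] = "w" from rfl,
            show ("" ++ String.mk ['w']) = "w" from rfl,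
            show moves.getD "w" ((0:Int),(0:Int)) = (-2,0) from by decide,
            show moves.getD "w" ((0:Int),(0:Int)) = (-2,0) from by decide] at this ⊢
      tauto

-- ===== VERDICT (by name: the statement is the Claim_ definition above) =====
theorem locate_tile_spec : Claim_equal_locate_tile := by
  intro directions _ hpre
  unfold Spec_locate_tile locate_tile locate_tile_alt
  have hpre' : ∀ c ∈ directions.toList, c = 'n' ∨ c = 's' ∨ c = 'e' ∨ c = 'w' := by
    intro c hc
    have h2 := (List.all_eq_true.mp hpre) c hc
    simp at h2
    tauto
  have := key directions.toList 0 0 hpre'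
  simp [this]
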